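-- pv_equiv track=rewrite | github.com/nerdster13/Google-Foobar-2020 | Level 2/lovely_lucky_lambs/solution.py | solution
-- ===== SOURCE A (Python) =====
-- def solution(total_lambs):
--     generous=[]
--
--     i = 0
--     sum = 0
--     while i <= total_lambs:
--         cur = 2**i
--         generous.append(cur)
--         sum += cur
--         if sum > total_lambs:
--             break
--         i += 1
--
--     stingy = [1,1]
--     sum = 2
--     i = 2
--     while i <= total_lambs:
--         new = stingy[i-1] + stingy[i-2]
--         stingy.append(new)
--         sum += int(stingy[i])
--         if sum > total_lambs:
--             break
--         i += 1
--
--     return abs(len(stingy) - len(generous))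
-- ===== SOURCE B (Python) =====
-- def solution(total_lambs):
--     # generous: cumulative sum of 2^0..2^(k-1) is 2^k - 1, so the loop length
--     # is the bit length of total_lambs + 1 (0 for negative totals).
--     generous_len = (total_lambs + 1).bit_length() if total_lambs >= 0 else 0
--     # stingy: Fibonacci with two rolling values instead of a list.
--     length, s, a, b = 2, 2, 1, 1
--     while length <= total_lambs:
--         a, b = b, a + b
--         s += b
--         length += 1
--         if s > total_lambs:
--             break
--     return abs(length - generous_len)
-- ===== Notes on version B (the rewrite author's own statement) =====
-- stated objective: simpler
-- what changed: The generous powers-of-2 loop is replaced by the closed form (total_lambs+1).bit_length() (0 for negative totals), and the stingy Fibonacci list is replaced by two rolling variables tracking only the length.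
import Mathlib
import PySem

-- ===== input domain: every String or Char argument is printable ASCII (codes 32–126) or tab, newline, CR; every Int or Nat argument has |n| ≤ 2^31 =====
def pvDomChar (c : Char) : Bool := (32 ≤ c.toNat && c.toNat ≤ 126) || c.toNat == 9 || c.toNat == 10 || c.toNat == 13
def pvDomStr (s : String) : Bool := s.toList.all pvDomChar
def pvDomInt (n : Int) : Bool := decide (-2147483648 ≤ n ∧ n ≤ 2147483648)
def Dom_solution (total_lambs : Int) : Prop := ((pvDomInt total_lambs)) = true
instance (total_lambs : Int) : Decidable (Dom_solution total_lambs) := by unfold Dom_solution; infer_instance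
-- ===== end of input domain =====

-- B replaces A's generous power-of-2 loop with the closed form (total+1).bit_length()
-- and the stingy Fibonacci list with two rolling variables (simpler, O(1) space).


-- ===== PORT A =====
-- A's first while loop; the counter i only ever holds 0,1,2,… so it is carried
-- as a Nat (Python's 2**i is exactly 2 ^ i there).
-- (fuel makes the recursion structural; (total+1-i).toNat fuel is exactly the
-- remaining iteration budget, so fuel 0 coincides with the loop condition failing)
def genLoop (total : Int) (fuel i : Nat) (sum : Int) (generous : List Int) : List Int :=
  match fuel with
  | 0 => generous
  | fuel + 1 =>
    if (i : Int) ≤ total then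
      let cur : Int := 2 ^ i
      let generous' := generous ++ [cur]
      let sum' := sum + cur
      if sum' > total then generous'
      else genLoop total fuel (i + 1) sum' generous'
    else generous

-- A's second while loop; every index read (i-1, i-2, i) is in range whenever the
-- loop runs (len stingy = i ≥ 2 there), where List.getD is exact Python indexing.
def stingyLoop (total : Int) (fuel : Nat) (stingy : List Int) (sum : Int) (i : Nat) : List Int :=
  match fuel with
  | 0 => stingy
  | fuel + 1 =>
    if (i : Int) ≤ total then
      let new := stingy.getD (i - 1) 0 + stingy.getD (i - 2) 0
      let stingy' := stingy ++ [new]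
      let sum' := sum + stingy'.getD i 0
      if sum' > total then stingy'
      else stingyLoop total fuel stingy' sum' (i + 1)
    else stingy

def solution (total_lambs : Int) : Int :=
  let generous := genLoop total_lambs (total_lambs + 1).toNat 0 0 []
  let stingy := stingyLoop total_lambs (total_lambs - 1).toNat [1, 1] 2 2
  |(stingy.length : Int) - (generous.length : Int)|

-- ===== PORT B =====
-- B's while loop: Fibonacci with two rolling values, tracking only the length.
def altLoop (total : Int) (fuel length : Nat) (s a b : Int) : Nat :=
  match fuel with
  | 0 => length
  | fuel + 1 =>
    if (length : Int) ≤ total then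
      let b' := a + b
      let s' := s + b'
      let length' := length + 1
      if s' > total then length'
      else altLoop total fuel length' s' b b'
    else length

def solution_alt (total_lambs : Int) : Int :=
  let generousLen : Int :=
    if total_lambs ≥ 0 then (PySem.Int.bitLength (total_lambs + 1) : Int) else 0
  let stingyLen := altLoop total_lambs (total_lambs - 1).toNat 2 2 1 1
  |(stingyLen : Int) - generousLen|

-- ===== PRECONDITION & SPEC =====
def Spec_solution (total_lambs : Int) (out : Int) : Prop := out = solution_alt total_lambs
instance (total_lambs : Int) (out : Int) : Decidable (Spec_solution total_lambs out) := by unfold Spec_solution; infer_instance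

-- ===== CLAIM (what is proved, stated in full; the proofs are below) =====
def Claim_equal_solution : Prop := ∀ (total_lambs : Int), Dom_solution total_lambs → Spec_solution total_lambs (solution total_lambs)

-- ===== LEMMAS AND PROOFS =====

lemma getD_concat_self (xs : List Int) (v d : Int) : (xs ++ [v]).getD xs.length d = v := by
  simp [List.getD]

lemma getD_concat_lt (xs : List Int) (v d : Int) (j : Nat) (h : j < xs.length) :
    (xs ++ [v]).getD j d = xs.getD j d := by
  simp [List.getD, List.getElem?_append_left h]

-- A's stingy-list loop has the same length as B's rolling-variable loop (same fuel).
lemma stingy_eq (total : Int) (k : Nat) :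
    ∀ (i : Nat) (stingy : List Int) (sum : Int),
      stingy.length = i → 2 ≤ i →
      (stingyLoop total k stingy sum i).length =
        altLoop total k i sum (stingy.getD (i - 2) 0) (stingy.getD (i - 1) 0) := by
  induction k with
  | zero =>
    intro i stingy sum hlen hi
    rw [stingyLoop, altLoop, hlen]
  | succ k ih =>
    intro i stingy sum hlen hi
    rw [stingyLoop, altLoop]
    by_cases h : (i : Int) ≤ total
    · rw [if_pos h, if_pos h]
      have h1 : i - 1 < stingy.length := by omega
      have h2 : i - 2 < stingy.length := by omega
      have hnew : (stingy ++ [stingy.getD (i - 1) 0 + stingy.getD (i - 2) 0]).getD i 0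
          = stingy.getD (i - 1) 0 + stingy.getD (i - 2) 0 := by
        have := getD_concat_self stingy (stingy.getD (i - 1) 0 + stingy.getD (i - 2) 0) 0
        rw [hlen] at this; exact this
      simp only [hnew]
      have hsum : sum + (stingy.getD (i - 1) 0 + stingy.getD (i - 2) 0)
          = sum + (stingy.getD (i - 2) 0 + stingy.getD (i - 1) 0) := by ring
      rw [hsum]
      by_cases hb : sum + (stingy.getD (i - 2) 0 + stingy.getD (i - 1) 0) > total
      · rw [if_pos hb, if_pos hb]
        simp [hlen]
      · rw [if_neg hb, if_neg hb]
        have hlen' : (stingy ++ [stingy.getD (i - 1) 0 + stingy.getD (i - 2) 0]).length = i + 1 := by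
          simp [hlen]
        have e1 : (stingy ++ [stingy.getD (i - 1) 0 + stingy.getD (i - 2) 0]).getD (i + 1 - 2) 0
            = stingy.getD (i - 1) 0 := by
          rw [show i + 1 - 2 = i - 1 by omega, getD_concat_lt _ _ _ _ h1]
        have e2 : (stingy ++ [stingy.getD (i - 1) 0 + stingy.getD (i - 2) 0]).getD (i + 1 - 1) 0
            = stingy.getD (i - 1) 0 + stingy.getD (i - 2) 0 := by
          rw [show i + 1 - 1 = i by omega]
          have := getD_concat_self stingy (stingy.getD (i - 1) 0 + stingy.getD (i - 2) 0) 0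
          rw [hlen] at this; exact this
        have := ih (i + 1) (stingy ++ [stingy.getD (i - 1) 0 + stingy.getD (i - 2) 0])
          (sum + (stingy.getD (i - 2) 0 + stingy.getD (i - 1) 0)) hlen' (by omega)
        rw [e1, e2] at this
        rw [this]
        congr 1
        ring
    · rw [if_neg h, if_neg h, hlen]

-- bit_length is characterised by the enclosing powers of two.
lemma bitLength_char (n : Int) (j : Nat) (h1 : 2 ^ j ≤ n.natAbs) (h2 : n.natAbs < 2 ^ (j + 1)) :
    PySem.Int.bitLength n = j + 1 := by
  have hne : n ≠ 0 := by
    intro h; rw [h] at h1; simp at h1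
  have hlo := PySem.Int.two_pow_bitLength_le n hne
  have hhi := PySem.Int.lt_two_pow_bitLength n
  have ha : PySem.Int.bitLength n - 1 < j + 1 := by
    have : 2 ^ (PySem.Int.bitLength n - 1) < 2 ^ (j + 1) := by omega
    exact (Nat.pow_lt_pow_iff_right (by omega)).mp this
  have hb : j < PySem.Int.bitLength n := by
    have : 2 ^ j < 2 ^ PySem.Int.bitLength n := by omega
    exact (Nat.pow_lt_pow_iff_right (by omega)).mp this
  omega

-- A's generous loop length is the bit length of total+1 (total ≥ 0).
lemma gen_len (total : Int) (ht : 0 ≤ total) (k : Nat) :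
    ∀ (i : Nat) (acc : List Int) (sum : Int),
      (total + 1 - i).toNat ≤ k → acc.length = i → sum = 2 ^ (i : Nat) - 1 → sum ≤ total →
      (genLoop total k i sum acc).length = PySem.Int.bitLength (total + 1) := by
  induction k with
  | zero =>
    intro i acc sum hk hlen hsum hle
    exfalso
    have hp : (i : Int) < (2 : Int) ^ i := by
      have := Nat.lt_two_pow_self (n := i)
      have : ((i : Nat) : Int) < ((2 ^ i : Nat) : Int) := by exact_mod_cast this
      simpa using this
    omega
  | succ k ih =>
    intro i acc sum hk hlen hsum hle
    have hcond : (i : Int) ≤ total := by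
      have hp : (i : Int) < (2 : Int) ^ i := by
        have := Nat.lt_two_pow_self (n := i)
        have : ((i : Nat) : Int) < ((2 ^ i : Nat) : Int) := by exact_mod_cast this
        simpa using this
      omega
    rw [genLoop, if_pos hcond]
    have hcast : ((2 ^ (i + 1) : Nat) : Int) = (2 : Int) ^ i * 2 := by
      push_cast; ring
    by_cases hb : sum + 2 ^ i > total
    · rw [if_pos hb]
      have hlen' : (acc ++ [(2 : Int) ^ i]).length = i + 1 := by simp [hlen]
      rw [hlen']
      have habs : (total + 1).natAbs = (total + 1).toNat := by omega
      refine (bitLength_char (total + 1) i ?_ ?_).symm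
      · have : ((2 ^ i : Nat) : Int) ≤ total + 1 := by push_cast; omega
        omega
      · have : total + 1 < ((2 ^ (i + 1) : Nat) : Int) := by rw [hcast]; omega
        omega
    · rw [if_neg hb]
      refine ih (i + 1) (acc ++ [(2 : Int) ^ i]) (sum + 2 ^ i) (by omega) (by simp [hlen]) ?_ (by omega)
      rw [hsum]; ring

-- ===== VERDICT (by name: the statement is the Claim_ definition above) =====
theorem solution_spec : Claim_equal_solution := by
  intro total _
  unfold Spec_solution solution solution_alt
  have hst : (stingyLoop total (total - 1).toNat [1, 1] 2 2).length
      = altLoop total (total - 1).toNat 2 2 1 1 := by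
    have := stingy_eq total (total - 1).toNat 2 [1, 1] 2 (by simp) (by omega)
    simpa [List.getD] using this
  by_cases ht : total ≥ 0
  · have hg : (genLoop total (total + 1).toNat 0 0 []).length = PySem.Int.bitLength (total + 1) := by
      exact gen_len total ht (total + 1).toNat 0 [] 0 (by omega) (by simp) (by norm_num) (by omega)
    simp only [hst, hg, if_pos ht]
  · have hg : genLoop total (total + 1).toNat 0 0 [] = [] := by
      rw [show (total + 1).toNat = 0 from by omega, genLoop]
    simp only [hst, hg, if_neg ht, List.length_nil]
    simp
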